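-- pv_equiv track=rewrite | github.com/journnie/leetcode | 2319-check-if-matrix-is-x-matrix/2319-check-if-matrix-is-x-matrix.py | checkXMatrix
-- ===== SOURCE A (Python) =====
-- from typing import List
--
-- def checkXMatrix(grid: List[List[int]]) -> bool:
--      # n x n matrix
--     n = len(grid)
--
--     # check the diagonals != 0; True
--     # primary diagonal elements
--     row = 0
--     col = 0
--     while row < n:
--         if grid[row][col] == 0:
--             return False
--         row += 1
--         col += 1
--     # secondary diagonal elements
--     row = 0
--     col = n - 1
--     while row < n:
--         if grid[row][col] == 0:
--             return False
--         row += 1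
--         col -= 1
--
--     # check the non-diagonals == 0; True
--     for i in range(n):
--         for j in range(n):
--             if i != j and j != n-1-i:
--                 if grid[i][j] != 0:
--                     return False
--     return True
-- ===== SOURCE B (Python) =====
-- def checkXMatrix(grid):
--     # Per-row pattern check: the nonzero positions among row i's first n columns
--     # must be exactly the sorted diagonal pair [min(i,n-1-i), max(i,n-1-i)]
--     # (collapsed to a single index on the centre row of an odd-sized matrix).
--     n = len(grid)
--     for i, row in enumerate(grid):
--         lo = min(i, n - 1 - i)
--         hi = max(i, n - 1 - i)
--         expected = [lo] if lo == hi else [lo, hi]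
--         nonzeros = [j for j in range(n) if row[j] != 0]
--         if nonzeros != expected:
--             return False
--     return True
-- ===== Notes on version B (the rewrite author's own statement) =====
-- stated objective: alternative
-- what changed: B checks each ROW as a unit: it extracts the row's sorted list of nonzero column indices (over the first n columns) and compares it with the expected diagonal pattern [min(i,n-1-i), max(i,n-1-i)] (one index on the centre row), instead of A's two explicit diagonal walks followed by a nested off-diagonal scan.
-- outside the precondition, e.g. on checkXMatrix([[9], [1, 0], [1, 6], [0, 78]]): A returns False, B raises IndexError; on checkXMatrix([[0, 1], [1]]): A returns False, B returns False
import Mathlib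
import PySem

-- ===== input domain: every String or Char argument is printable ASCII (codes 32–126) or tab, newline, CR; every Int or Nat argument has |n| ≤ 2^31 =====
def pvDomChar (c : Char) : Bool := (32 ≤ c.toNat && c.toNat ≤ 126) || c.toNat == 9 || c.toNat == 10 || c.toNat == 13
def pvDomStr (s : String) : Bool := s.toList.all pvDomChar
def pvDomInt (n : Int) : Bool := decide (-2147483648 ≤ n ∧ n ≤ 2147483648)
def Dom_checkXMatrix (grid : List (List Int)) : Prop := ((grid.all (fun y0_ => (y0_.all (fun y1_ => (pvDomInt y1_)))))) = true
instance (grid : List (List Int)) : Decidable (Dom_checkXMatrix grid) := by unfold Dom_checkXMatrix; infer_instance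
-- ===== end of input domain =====

-- B checks each row as a unit — its list of nonzero column indices must equal the
-- expected diagonal pattern — instead of A's two diagonal walks plus off-diagonal scan.

-- ===== PORT A =====
-- primary-diagonal while loop: row,col both increase
def pvA_diag1 (grid : List (List Int)) (n row col : Int) : Bool :=
  if row < n then
    if PySem.List.pyGetD (PySem.List.pyGetD grid row []) col 0 = 0 then false
    else pvA_diag1 grid n (row + 1) (col + 1)
  else true
termination_by (n - row).toNat
decreasing_by omega

-- secondary-diagonal while loop: row increases, col decreases
def pvA_diag2 (grid : List (List Int)) (n row col : Int) : Bool :=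
  if row < n then
    if PySem.List.pyGetD (PySem.List.pyGetD grid row []) col 0 = 0 then false
    else pvA_diag2 grid n (row + 1) (col - 1)
  else true
termination_by (n - row).toNat
decreasing_by omega

def checkXMatrix (grid : List (List Int)) : Bool :=
  let n : Int := grid.length
  if pvA_diag1 grid n 0 0 = false then false
  else if pvA_diag2 grid n 0 (n - 1) = false then false
  else
    (PySem.List.pyRange 0 n 1).all fun i =>
      (PySem.List.pyRange 0 n 1).all fun j =>
        if i ≠ j ∧ j ≠ n - 1 - i then
          decide (PySem.List.pyGetD (PySem.List.pyGetD grid i []) j 0 = 0)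
        else true

-- ===== PORT B =====
-- the for-loop over enumerate(grid) with early return, as structural recursion
def pvB_rows (n : Int) : List (Int × List Int) → Bool
  | [] => true
  | (i, row) :: rest =>
      let lo := min i (n - 1 - i)
      let hi := max i (n - 1 - i)
      let expected := if lo = hi then [lo] else [lo, hi]
      let nonzeros := (PySem.List.pyRange 0 n 1).filter
        (fun j => PySem.List.pyGetD row j 0 != 0)
      if nonzeros ≠ expected then false else pvB_rows n rest

def checkXMatrix_alt (grid : List (List Int)) : Bool :=
  let n : Int := grid.length
  pvB_rows n (PySem.List.enumerate grid 0)

-- ===== PRECONDITION & SPEC =====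
-- Pre_ excludes grids with a row shorter than the number of rows (the task is n×n):
-- there A raises IndexError unless an early zero stops it, and B likewise raises
-- unless an earlier row already fails its pattern check.
def Pre_checkXMatrix (grid : List (List Int)) : Prop :=
  ∀ row ∈ grid, grid.length ≤ row.length
instance (grid : List (List Int)) : Decidable (Pre_checkXMatrix grid) := by
  unfold Pre_checkXMatrix; infer_instance
def pvWitness_checkXMatrix : List (List Int) := [[1, 0], [0, 1]]
def Spec_checkXMatrix (grid : List (List Int)) (out : Bool) : Prop := out = checkXMatrix_alt grid
instance (grid : List (List Int)) (out : Bool) : Decidable (Spec_checkXMatrix grid out) := by unfold Spec_checkXMatrix; infer_instance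

-- ===== CLAIM (what is proved, stated in full; the proofs are below) =====
def Claim_equal_checkXMatrix : Prop := ∀ (grid : List (List Int)), Dom_checkXMatrix grid → Pre_checkXMatrix grid → Spec_checkXMatrix grid (checkXMatrix grid)

-- ===== LEMMAS AND PROOFS =====

-- the shared cell accessor both sides spell out
def pvCell (grid : List (List Int)) (i j : Int) : Int :=
  PySem.List.pyGetD (PySem.List.pyGetD grid i []) j 0

-- the cell-classification middle form: every cell is nonzero iff it is diagonal
def pvClass (grid : List (List Int)) : Bool :=
  let n : Int := grid.length
  (PySem.List.pyRange 0 n 1).all fun i =>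
    (PySem.List.pyRange 0 n 1).all fun j =>
      decide (PySem.List.pyGetD (PySem.List.pyGetD grid i []) j 0 ≠ 0)
        == decide (i = j ∨ i + j = n - 1)

-- B-side per-row pieces, named for the proofs
def pvExp (n i : Int) : List Int :=
  let lo := min i (n - 1 - i)
  let hi := max i (n - 1 - i)
  if lo = hi then [lo] else [lo, hi]

def pvNZ (n : Int) (row : List Int) : List Int :=
  (PySem.List.pyRange 0 n 1).filter (fun j => PySem.List.pyGetD row j 0 != 0)

theorem pvA_diag1_eq (grid : List (List Int)) (n : Int) : ∀ row col : Int,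
    pvA_diag1 grid n row col
      = (PySem.List.pyRange row n 1).all fun i => !decide (pvCell grid i (col + i - row) = 0) := by
  intro row col
  unfold pvA_diag1
  split
  · rename_i h
    rw [PySem.List.pyRange_one_cons h, List.all_cons]
    by_cases hz : PySem.List.pyGetD (PySem.List.pyGetD grid row []) col 0 = 0
    · simp [hz, pvCell]
    · simp only [hz, if_false]
      rw [pvA_diag1_eq grid n (row + 1) (col + 1)]
      have hfun : (fun i => !decide (pvCell grid i (col + 1 + i - (row + 1)) = 0))
          = (fun i => !decide (pvCell grid i (col + i - row) = 0)) := by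
        funext i
        have : col + 1 + i - (row + 1) = col + i - row := by omega
        rw [this]
      rw [hfun]
      simp [pvCell, hz]
  · rename_i h
    rw [PySem.List.pyRange_one_eq_nil (by omega)]
    simp
termination_by row => (n - row).toNat
decreasing_by omega

theorem pvA_diag2_eq (grid : List (List Int)) (n : Int) : ∀ row col : Int,
    pvA_diag2 grid n row col
      = (PySem.List.pyRange row n 1).all fun i => !decide (pvCell grid i (col - (i - row)) = 0) := by
  intro row col
  unfold pvA_diag2
  split
  · rename_i h
    rw [PySem.List.pyRange_one_cons h, List.all_cons]
    by_cases hz : PySem.List.pyGetD (PySem.List.pyGetD grid row []) col 0 = 0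
    · simp [hz, pvCell]
    · simp only [hz, if_false]
      rw [pvA_diag2_eq grid n (row + 1) (col - 1)]
      have hfun : (fun i => !decide (pvCell grid i (col - 1 - (i - (row + 1))) = 0))
          = (fun i => !decide (pvCell grid i (col - (i - row)) = 0)) := by
        funext i
        have : col - 1 - (i - (row + 1)) = col - (i - row) := by omega
        rw [this]
      rw [hfun]
      simp [pvCell, hz]
  · rename_i h
    rw [PySem.List.pyRange_one_eq_nil (by omega)]
    simp
termination_by row => (n - row).toNat
decreasing_by omega

theorem checkXMatrix_eq_class (grid : List (List Int)) :
    checkXMatrix grid = pvClass grid := by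
  simp only [checkXMatrix, pvClass]
  generalize (grid.length : Int) = n
  rw [Bool.eq_iff_iff]
  rw [pvA_diag1_eq grid n 0 0, pvA_diag2_eq grid n 0 (n - 1)]
  constructor
  · intro h
    split_ifs at h with h1 h2
    rw [Bool.not_eq_false] at h1 h2
    simp only [List.all_eq_true, PySem.List.mem_pyRange_one, Bool.not_eq_eq_eq_not,
      Bool.not_true, decide_eq_false_iff_not, and_imp] at h1 h2 h ⊢
    intro i hi0 hin j hj0 hjn
    rw [beq_iff_eq, decide_eq_decide]
    constructor
    · intro hne
      by_contra hdiag
      push Not at hdiag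
      exact hne (by
        have := h i hi0 hin j hj0 hjn
        rw [if_pos (show i ≠ j ∧ j ≠ n - 1 - i from ⟨hdiag.1, by omega⟩)] at this
        exact of_decide_eq_true this)
    · intro hd
      rcases hd with hij | hsum
      · subst hij
        have := h1 i hi0 hin
        simpa [pvCell] using this
      · have hj : j = n - 1 - i := by omega
        subst hj
        have := h2 i hi0 hin
        simp only [pvCell] at this ⊢
        have harith : n - 1 - (i - 0) = n - 1 - i := by omega
        rw [harith] at this
        exact this
  · intro hB
    simp only [List.all_eq_true, PySem.List.mem_pyRange_one, and_imp] at hB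
    have hcell : ∀ i j : Int, 0 ≤ i → i < n → 0 ≤ j → j < n →
        (pvCell grid i j ≠ 0 ↔ (i = j ∨ i + j = n - 1)) := by
      intro i j hi0 hin hj0 hjn
      have := hB i hi0 hin j hj0 hjn
      rw [beq_iff_eq, decide_eq_decide] at this
      simpa [pvCell] using this
    have h1 : ((PySem.List.pyRange 0 n 1).all fun i => !decide (pvCell grid i (0 + i - 0) = 0)) = true := by
      simp only [List.all_eq_true, PySem.List.mem_pyRange_one, and_imp,
        Bool.not_eq_eq_eq_not, Bool.not_true, decide_eq_false_iff_not]
      intro i hi0 hin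
      have harith : 0 + i - 0 = i := by omega
      rw [harith]
      exact (hcell i i hi0 hin hi0 hin).2 (Or.inl rfl)
    have h2 : ((PySem.List.pyRange 0 n 1).all fun i => !decide (pvCell grid i (n - 1 - (i - 0)) = 0)) = true := by
      simp only [List.all_eq_true, PySem.List.mem_pyRange_one, and_imp,
        Bool.not_eq_eq_eq_not, Bool.not_true, decide_eq_false_iff_not]
      intro i hi0 hin
      have harith : n - 1 - (i - 0) = n - 1 - i := by omega
      rw [harith]
      exact (hcell i (n - 1 - i) hi0 hin (by omega) (by omega)).2 (Or.inr (by omega))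
    rw [h1, h2]
    simp only [Bool.true_eq_false, if_false]
    simp only [List.all_eq_true, PySem.List.mem_pyRange_one, and_imp]
    intro i hi0 hin j hj0 hjn
    split
    · rename_i hcond
      rw [decide_eq_true_eq]
      by_contra hne
      have := (hcell i j hi0 hin hj0 hjn).1 hne
      rcases this with h | h
      · exact hcond.1 h
      · exact hcond.2 (by omega)
    · rfl

-- pvB_rows is the all-fold of the per-row test
theorem pvB_rows_eq_all (n : Int) (l : List (Int × List Int)) :
    pvB_rows n l = l.all (fun q => decide (pvNZ n q.2 = pvExp n q.1)) := by
  induction l with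
  | nil => rfl
  | cons hd tl ih =>
    obtain ⟨i, row⟩ := hd
    show (if pvNZ n row ≠ pvExp n i then false else pvB_rows n tl) = _
    rw [List.all_cons, ih]
    by_cases h : pvNZ n row = pvExp n i
    · simp [h]
    · simp [h]

-- filter of a range is that two-element list iff the predicate matches exactly there
theorem filter_pair_iff (m a b : Int) (p : Int → Bool) (h0 : 0 ≤ a) (hab : a < b) (hbm : b < m) :
    (PySem.List.pyRange 0 m 1).filter p = [a, b]
      ↔ ∀ j : Int, 0 ≤ j → j < m → (p j = true ↔ (j = a ∨ j = b)) := by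
  constructor
  · intro hf j hj0 hjm
    constructor
    · intro hp
      have hmem : j ∈ (PySem.List.pyRange 0 m 1).filter p := by
        rw [List.mem_filter]
        exact ⟨by rw [PySem.List.mem_pyRange_one]; omega, hp⟩
      rw [hf] at hmem
      simpa using hmem
    · intro hj
      have hmem : j ∈ (PySem.List.pyRange 0 m 1).filter p := by
        rw [hf]; rcases hj with h | h <;> simp [h]
      exact (List.mem_filter.mp hmem).2
  · intro hp
    have hnil : ∀ x y : Int, 0 ≤ x → y ≤ m →
        (∀ j : Int, x ≤ j → j < y → j ≠ a ∧ j ≠ b) →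
        (PySem.List.pyRange x y 1).filter p = [] := by
      intro x y hx hy hno
      rw [List.filter_eq_nil_iff]
      intro j hj
      rw [PySem.List.mem_pyRange_one] at hj
      have hne := hno j hj.1 hj.2
      have := (hp j (by omega) (by omega))
      simp only [this]
      simp [hne.1, hne.2]
    rw [PySem.List.pyRange_one_append 0 a m (by omega) (by omega)]
    rw [PySem.List.pyRange_one_cons (show a < m by omega)]
    rw [PySem.List.pyRange_one_append (a+1) b m (by omega) (by omega)]
    rw [PySem.List.pyRange_one_cons (show b < m by omega)]
    simp only [List.filter_append, List.filter_cons]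
    rw [hnil 0 a (by omega) (by omega) (fun j h1 h2 => ⟨by omega, by omega⟩)]
    rw [hnil (a+1) b (by omega) (by omega) (fun j h1 h2 => ⟨by omega, by omega⟩)]
    rw [hnil (b+1) m (by omega) (by omega) (fun j h1 h2 => ⟨by omega, by omega⟩)]
    have hpa : p a = true := (hp a (by omega) (by omega)).2 (Or.inl rfl)
    have hpb : p b = true := (hp b (by omega) (by omega)).2 (Or.inr rfl)
    simp [hpa, hpb]

-- filter of a range is a singleton iff the predicate matches exactly there
theorem filter_single_iff (m a : Int) (p : Int → Bool) (h0 : 0 ≤ a) (ham : a < m) :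
    (PySem.List.pyRange 0 m 1).filter p = [a]
      ↔ ∀ j : Int, 0 ≤ j → j < m → (p j = true ↔ j = a) := by
  constructor
  · intro hf j hj0 hjm
    constructor
    · intro hp
      have hmem : j ∈ (PySem.List.pyRange 0 m 1).filter p := by
        rw [List.mem_filter]
        exact ⟨by rw [PySem.List.mem_pyRange_one]; omega, hp⟩
      rw [hf] at hmem
      simpa using hmem
    · intro hj
      have hmem : j ∈ (PySem.List.pyRange 0 m 1).filter p := by
        rw [hf]; simp [hj]
      exact (List.mem_filter.mp hmem).2
  · intro hp
    have hnil : ∀ x y : Int, 0 ≤ x → y ≤ m →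
        (∀ j : Int, x ≤ j → j < y → j ≠ a) →
        (PySem.List.pyRange x y 1).filter p = [] := by
      intro x y hx hy hno
      rw [List.filter_eq_nil_iff]
      intro j hj
      rw [PySem.List.mem_pyRange_one] at hj
      have hne := hno j hj.1 hj.2
      have := (hp j (by omega) (by omega))
      simp only [this]
      simp [hne]
    rw [PySem.List.pyRange_one_append 0 a m (by omega) (by omega)]
    rw [PySem.List.pyRange_one_cons (show a < m by omega)]
    simp only [List.filter_append, List.filter_cons]
    rw [hnil 0 a (by omega) (by omega) (fun j h1 h2 => by omega)]
    rw [hnil (a+1) m (by omega) (by omega) (fun j h1 h2 => by omega)]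
    have hpa : p a = true := (hp a (by omega) (by omega)).2 rfl
    simp [hpa]

-- per-row bridge: the inner classification pass equals the pattern comparison
theorem row_bridge (n i : Int) (row : List Int) (hi0 : 0 ≤ i) (hin : i < n) :
    ((PySem.List.pyRange 0 n 1).all fun j =>
        decide (PySem.List.pyGetD row j 0 ≠ 0) == decide (i = j ∨ i + j = n - 1))
      = decide (pvNZ n row = pvExp n i) := by
  rw [Bool.eq_iff_iff]
  rw [decide_eq_true_eq]
  unfold pvNZ
  simp only [List.all_eq_true, PySem.List.mem_pyRange_one, and_imp, beq_iff_eq,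
    decide_eq_decide]
  unfold pvExp
  by_cases hc : min i (n - 1 - i) = max i (n - 1 - i)
  · simp only [hc, if_pos]
    rw [filter_single_iff n (max i (n - 1 - i)) _ (by omega) (by omega)]
    constructor
    · intro h j hj0 hjm
      rw [bne_iff_ne, h j hj0 hjm]
      omega
    · intro h j hj0 hjm
      have := h j hj0 hjm
      rw [bne_iff_ne] at this
      rw [this]
      omega
  · have hlt : min i (n - 1 - i) < max i (n - 1 - i) := by omega
    simp only [if_neg hc]
    rw [filter_pair_iff n (min i (n - 1 - i)) (max i (n - 1 - i)) _ (by omega) hlt (by omega)]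
    constructor
    · intro h j hj0 hjm
      rw [bne_iff_ne, h j hj0 hjm]
      omega
    · intro h j hj0 hjm
      have := h j hj0 hjm
      rw [bne_iff_ne] at this
      rw [this]
      omega

-- all-congruence over members (needed since the per-row bridge uses the row length)
theorem all_congr_mem {α : Type} (l : List α) (p q : α → Bool)
    (h : ∀ x ∈ l, p x = q x) : l.all p = l.all q := by
  induction l with
  | nil => rfl
  | cons hd tl ih =>
    simp only [List.all_cons, h hd (List.mem_cons_self ..),
      ih (fun x hx => h x (List.mem_cons_of_mem _ hx))]

-- outer bridge: classification equals B (the ports agree on every grid;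
-- Pre_ is about faithfulness to the Pythons, which raise outside it)
theorem class_eq_alt (grid : List (List Int)) :
    pvClass grid = checkXMatrix_alt grid := by
  simp only [pvClass, checkXMatrix_alt]
  rw [pvB_rows_eq_all]
  rw [PySem.List.enumerate_eq_map_pyRange grid ([] : List Int)]
  simp only [PySem.List.len_eq]
  rw [List.all_map]
  apply all_congr_mem
  intro i hi
  rw [PySem.List.mem_pyRange_one] at hi
  exact row_bridge (grid.length : Int) i (PySem.List.pyGetD grid i []) hi.1 hi.2

-- ===== VERDICT (by name: the statement is the Claim_ definition above) =====
theorem checkXMatrix_spec : Claim_equal_checkXMatrix := by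
  intro grid _ _
  unfold Spec_checkXMatrix
  rw [checkXMatrix_eq_class, class_eq_alt grid]
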